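-- pv_equiv track=rewrite | github.com/BLEND360/blendx-sfguide-mktplace | backend/app/services/nl_ai_generator_service.py | _fix_json_string_escaping
-- ===== SOURCE A (Python) =====
-- def _fix_json_string_escaping(json_str: str) -> str:
--     """
--     Fix common JSON escaping issues in LLM-generated JSON strings.
--
--     LLMs often produce JSON with:
--     - Unescaped newlines inside string values
--     - Unescaped quotes inside string values
--     - Unescaped backslashes
--
--     Args:
--         json_str: Raw JSON string from LLM
--
--     Returns:
--         str: JSON string with fixed escaping
--     """
--     # Strategy: Find string values and fix escaping within them
--     result = []
--     i = 0
--     in_string = False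
--     string_start = -1
--
--     while i < len(json_str):
--         char = json_str[i]
--
--         if char == '"' and (i == 0 or json_str[i-1] != '\\'):
--             if not in_string:
--                 # Starting a string
--                 in_string = True
--                 string_start = i
--                 result.append(char)
--             else:
--                 # Ending a string
--                 in_string = False
--                 result.append(char)
--         elif in_string:
--             # Inside a string - fix unescaped characters
--             if char == '\n':
--                 result.append('\\n')
--             elif char == '\r':
--                 result.append('\\r')
--             elif char == '\t':
--                 result.append('\\t')
--             else:
--                 result.append(char)
--         else:
--             result.append(char)
--
--         i += 1
--
--     return ''.join(result)
-- ===== SOURCE B (Python) =====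
-- def _fix_json_string_escaping(json_str: str) -> str:
--     # Pass 1: mark delimiter quotes: a '"' not preceded by a backslash.
--     delim = [c == '"' and (i == 0 or json_str[i - 1] != '\\')
--              for i, c in enumerate(json_str)]
--     # Pass 2: prefix counts: pre[i] = number of delimiter quotes strictly before i.
--     pre = [0]
--     for d in delim:
--         pre.append(pre[-1] + d)
--     # Pass 3: odd prefix count = inside a string; rewrite raw control chars there.
--     esc = {'\n': '\\n', '\r': '\\r', '\t': '\\t'}
--     pieces = [c if delim[i] or pre[i] % 2 == 0 else esc.get(c, c)
--               for i, c in enumerate(json_str)]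
--     return ''.join(pieces)
-- ===== Notes on version B (the rewrite author's own statement) =====
-- stated objective: alternative
-- what changed: Replaces A's single stateful while-loop (running in_string toggle) with three stateless passes: a delimiter-quote mask, a prefix-count array, and a comprehension that decides inside-ness by parity of the prefix count.
import Mathlib
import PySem

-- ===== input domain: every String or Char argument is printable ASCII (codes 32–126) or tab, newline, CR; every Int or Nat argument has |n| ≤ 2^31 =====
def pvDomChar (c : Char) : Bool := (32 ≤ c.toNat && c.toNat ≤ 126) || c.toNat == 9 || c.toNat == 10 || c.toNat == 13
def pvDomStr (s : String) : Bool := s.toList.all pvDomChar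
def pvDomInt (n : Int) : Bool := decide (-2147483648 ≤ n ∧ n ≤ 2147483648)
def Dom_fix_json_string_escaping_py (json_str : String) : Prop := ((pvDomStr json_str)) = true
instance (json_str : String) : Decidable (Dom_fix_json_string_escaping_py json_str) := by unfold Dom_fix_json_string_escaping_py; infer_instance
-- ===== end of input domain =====

-- B replaces A's stateful while-loop with three stateless passes (delimiter mask,
-- prefix counts, parity-driven rebuild); objective: alternative decomposition, same cost.


-- ===== PORT A =====
-- A's while-loop over indices, transliterated as a recursion carrying the previous
-- character (json_str[i-1]) and the in_string flag; the write-only string_start is omitted.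
def aGo (prev : Option Char) (inStr : Bool) : List Char → List String
  | [] => []
  | c :: rest =>
    if c == '"' && (match prev with | none => true | some p => p != '\\') then
      if !inStr then
        c.toString :: aGo (some c) true rest
      else
        c.toString :: aGo (some c) false rest
    else if inStr then
      (if c == '\n' then "\\n"
       else if c == '\r' then "\\r"
       else if c == '\t' then "\\t"
       else c.toString) :: aGo (some c) inStr rest
    else
      c.toString :: aGo (some c) inStr rest

def fix_json_string_escaping_py (json_str : String) : String :=
  String.join (aGo none false json_str.toList)

-- ===== PORT B =====
-- Pass 1: delimiter mask; json_str[i-1] becomes the carried previous character.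
def bDelims (prev : Option Char) : List Char → List Bool
  | [] => []
  | c :: rest =>
    (c == '"' && (match prev with | none => true | some p => p != '\\')) :: bDelims (some c) rest

-- Pass 2: pre[i] = number of delimiter quotes strictly before position i.
def bPre (k : Nat) : List Bool → List Nat
  | [] => []
  | d :: rest => k :: bPre (k + if d then 1 else 0) rest

-- Pass 3: rebuild; odd prefix count = inside a string.
def bEsc (c : Char) : String :=
  if c == '\n' then "\\n"
  else if c == '\r' then "\\r"
  else if c == '\t' then "\\t"
  else c.toString

def bPieces : List Char → List Bool → List Nat → List String
  | c :: cs, d :: ds, k :: ks =>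
    (if d || k % 2 == 0 then c.toString else bEsc c) :: bPieces cs ds ks
  | _, _, _ => []

def fix_json_string_escaping_py_alt (json_str : String) : String :=
  let cs := json_str.toList
  let dl := bDelims none cs
  String.join (bPieces cs dl (bPre 0 dl))

-- ===== PRECONDITION & SPEC =====
def Spec_fix_json_string_escaping_py (json_str : String) (out : String) : Prop := out = fix_json_string_escaping_py_alt json_str
instance (json_str : String) (out : String) : Decidable (Spec_fix_json_string_escaping_py json_str out) := by unfold Spec_fix_json_string_escaping_py; infer_instance

-- ===== CLAIM (what is proved, stated in full; the proofs are below) =====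
def Claim_equal_fix_json_string_escaping_py : Prop := ∀ (json_str : String), Dom_fix_json_string_escaping_py json_str → Spec_fix_json_string_escaping_py json_str (fix_json_string_escaping_py json_str)

-- ===== LEMMAS AND PROOFS =====
-- Invariant: A's running in_string flag equals the parity of the delimiter-prefix count.
theorem aGo_eq_bPieces (cs : List Char) :
    ∀ (prev : Option Char) (inStr : Bool) (k : Nat), inStr = decide (k % 2 = 1) →
      aGo prev inStr cs = bPieces cs (bDelims prev cs) (bPre k (bDelims prev cs)) := by
  induction cs with
  | nil => intro prev inStr k h; simp [aGo, bPieces]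
  | cons c rest ih =>
    intro prev inStr k h
    by_cases hd : (c == '"' && (match prev with | none => true | some p => p != '\\')) = true
    · have h2 : (!inStr) = decide ((k + 1) % 2 = 1) := by
        subst h; rcases Nat.mod_two_eq_zero_or_one k with h1 | h1 <;> simp [h1, Nat.add_mod]
      have hrec := ih (some c) (!inStr) (k + 1) h2
      simp only [aGo, bDelims, bPre, bPieces, hd, if_pos]
      cases hi : inStr <;> simp_all
    · have hrec := ih (some c) inStr k h
      simp only [aGo, bDelims, bPre, bPieces, hd, Bool.false_or]
      cases hi : inStr
      · subst h; simp_all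
      · subst h; simp_all [bEsc]

-- ===== VERDICT (by name: the statement is the Claim_ definition above) =====
theorem fix_json_string_escaping_py_spec : Claim_equal_fix_json_string_escaping_py := by
  intro s _
  unfold Spec_fix_json_string_escaping_py fix_json_string_escaping_py fix_json_string_escaping_py_alt
  rw [aGo_eq_bPieces s.toList none false 0 (by decide)]
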